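-- pv_equiv track=rewrite | github.com/lessvay/hse_tasks_python | week_2/task_3.py | thousands_to_tens
-- ===== SOURCE A (Python) =====
-- def thousands_to_tens(num):
--     tens = []
--     number_of_tens = 0
--     while num > 0:
--         current_number = num % 10
--         tens.append(
--             {"current_number": current_number, "number_of_tens": number_of_tens}
--         )
--         num = num // 10
--         number_of_tens += 1
--     return tens[::-1]
-- ===== SOURCE B (Python) =====
-- def thousands_to_tens(num):
--     d = 0
--     while 10 ** d <= num:
--         d += 1
--     return [{"current_number": num // 10 ** p % 10, "number_of_tens": p}
--             for p in range(d - 1, -1, -1)]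
-- ===== Notes on version B (the rewrite author's own statement) =====
-- stated objective: alternative
-- what changed: Instead of repeatedly dividing num and appending then reversing, B first counts the digits d (least d with 10**d > num) and then reads each digit positionally with num // 10**p % 10 over range(d-1, -1, -1), producing the list most-significant-first directly.
import Mathlib
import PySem

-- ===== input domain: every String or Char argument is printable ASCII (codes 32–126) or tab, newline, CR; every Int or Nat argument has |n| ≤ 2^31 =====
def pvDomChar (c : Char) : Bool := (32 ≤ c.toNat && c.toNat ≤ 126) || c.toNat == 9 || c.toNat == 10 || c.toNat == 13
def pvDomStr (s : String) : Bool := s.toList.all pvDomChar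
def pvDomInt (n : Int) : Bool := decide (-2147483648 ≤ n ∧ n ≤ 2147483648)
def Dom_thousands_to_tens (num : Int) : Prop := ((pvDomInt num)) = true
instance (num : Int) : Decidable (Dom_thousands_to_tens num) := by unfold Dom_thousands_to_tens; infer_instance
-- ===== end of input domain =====

-- B counts the digits first and then reads each digit positionally with // and %, instead of
-- A's divide-append-reverse loop (alternative algorithm, same cost).

-- ===== PORT A =====
-- while num > 0: append {current_number: num % 10, number_of_tens: k}; num //= 10; k += 1
def tttLoopA (num : Int) (k : Int) (acc : List (List (String × Int))) :
    List (List (String × Int)) :=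
  if _h : 0 < num then
    tttLoopA (PySem.Int.floordiv num 10) (k + 1)
      (acc ++ [[("current_number", PySem.Int.mod num 10), ("number_of_tens", k)]])
  else acc
termination_by num.toNat
decreasing_by
  rw [PySem.Int.floordiv_eq_ediv_of_pos (by norm_num : (0:Int) < 10)]
  omega

-- tens[::-1] is exactly List.reverse
def thousands_to_tens (num : Int) : List (List (String × Int)) :=
  (tttLoopA num 0 []).reverse

-- ===== PORT B =====
-- d = 0; while 10 ** d <= num: d += 1   (d is always a nonnegative count, held as Nat)
def tttLenB (num : Int) (d : Nat) : Nat :=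
  if _h : (10:Int) ^ d ≤ num then tttLenB num (d + 1) else d
termination_by num.toNat + 1 - 10 ^ d
decreasing_by
  have h1 : (10:Nat) ^ d ≤ num.toNat := by
    have : ((10:Nat) ^ d : Int) ≤ num := by push_cast; exact _h
    omega
  have h2 : (10:Nat) ^ d < 10 ^ (d + 1) := Nat.pow_lt_pow_succ (by norm_num)
  omega

-- [{current_number: num // 10**p % 10, number_of_tens: p} for p in range(d-1, -1, -1)]
-- (in the loop p ranges over d-1 … 0, all nonnegative, so 10 ** p is 10 ^ p.toNat exactly)
def thousands_to_tens_alt (num : Int) : List (List (String × Int)) :=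
  let d := tttLenB num 0
  (PySem.List.pyRange ((d : Int) - 1) (-1) (-1)).map fun p =>
    [("current_number", PySem.Int.mod (PySem.Int.floordiv num ((10:Int) ^ p.toNat)) 10),
     ("number_of_tens", p)]

-- ===== PRECONDITION & SPEC =====
def Spec_thousands_to_tens (num : Int) (out : List (List (String × Int))) : Prop := out = thousands_to_tens_alt num
instance (num : Int) (out : List (List (String × Int))) : Decidable (Spec_thousands_to_tens num out) := by unfold Spec_thousands_to_tens; infer_instance

-- ===== CLAIM (what is proved, stated in full; the proofs are below) =====
def Claim_equal_thousands_to_tens : Prop := ∀ (num : Int), Dom_thousands_to_tens num → Spec_thousands_to_tens num (thousands_to_tens num)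

-- ===== LEMMAS AND PROOFS =====

-- proof-side canonical digit count
def pvDigLen (n : Int) : Nat :=
  if _h : 0 < n then pvDigLen (n / 10) + 1 else 0
termination_by n.toNat
decreasing_by omega

theorem pvDigLen_nonpos {n : Int} (h : ¬ 0 < n) : pvDigLen n = 0 := by
  rw [pvDigLen, dif_neg h]

theorem pvDigLen_pos {n : Int} (h : 0 < n) : pvDigLen n = pvDigLen (n / 10) + 1 := by
  rw [pvDigLen, dif_pos h]

-- B's while loop computes d + (number of digits of num / 10^d)
theorem tttLenB_eq (num : Int) (d : Nat) :
    tttLenB num d = d + pvDigLen (num / (10:Int) ^ d) := by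
  induction d using tttLenB.induct (num := num) with
  | case1 d h ih =>
      rw [tttLenB, dif_pos h, ih]
      have h10 : (0:Int) < 10 ^ d := by positivity
      have hq : 0 < num / (10:Int) ^ d := by
        have := (Int.le_ediv_iff_mul_le h10 (a := 1) (b := num)).mpr (by omega)
        omega
      rw [pvDigLen_pos hq, Int.ediv_ediv_of_nonneg (by positivity : (0:Int) ≤ 10 ^ d)]
      have : (10:Int) ^ d * 10 = 10 ^ (d + 1) := by ring
      rw [this]; omega
  | case2 d h =>
      rw [tttLenB, dif_neg h]
      have h10 : (0:Int) < 10 ^ d := by positivity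
      have : num / (10:Int) ^ d < 1 := by
        rw [Int.ediv_lt_iff_lt_mul h10]; omega
      rw [pvDigLen_nonpos (by omega)]; omega

-- invariant of A's loop: it emits digit i of num (num // 10^i % 10) with index k + i, LSB first
theorem tttLoopA_eq (num k : Int) (acc : List (List (String × Int))) :
    tttLoopA num k acc = acc ++
      (List.range (pvDigLen num)).map (fun (i : Nat) =>
        [("current_number", num / (10:Int) ^ i % 10), ("number_of_tens", k + (i : Int))]) := by
  induction num, k, acc using tttLoopA.induct with
  | case1 num k acc h ih =>
      rw [tttLoopA, dif_pos h, ih,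
        PySem.Int.floordiv_eq_ediv_of_pos (by norm_num : (0:Int) < 10),
        PySem.Int.mod_eq_emod_of_pos (by norm_num : (0:Int) < 10),
        pvDigLen_pos h, List.range_succ_eq_map, List.map_cons, List.map_map]
      have hfun : ∀ i ∈ List.range (pvDigLen (num / 10)),
          ((fun (i : Nat) =>
            [("current_number", num / (10:Int) ^ i % 10), ("number_of_tens", k + (i : Int))])
            ∘ Nat.succ) i =
          (fun (i : Nat) =>
            [("current_number", num / 10 / (10:Int) ^ i % 10),
             ("number_of_tens", k + 1 + (i : Int))]) i := by
        intro i _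
        simp only [Function.comp]
        have e1 : num / (10:Int) ^ (i + 1) = num / 10 / 10 ^ i := by
          rw [Int.ediv_ediv_of_nonneg (by norm_num : (0:Int) ≤ 10)]
          have : (10:Int) * 10 ^ i = 10 ^ (i + 1) := by ring
          rw [this]
        have e2 : k + (((i:Int)) + 1) = k + 1 + i := by ring
        simp only [Nat.succ_eq_add_one, e1]
        push_cast
        rw [e2]
      rw [List.map_congr_left hfun]
      simp
  | case2 num k acc h =>
      rw [tttLoopA, dif_neg h, pvDigLen_nonpos h]
      simp

-- ===== VERDICT (by name: the statement is the Claim_ definition above) =====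
theorem thousands_to_tens_spec : Claim_equal_thousands_to_tens := by
  intro num _
  unfold Spec_thousands_to_tens thousands_to_tens thousands_to_tens_alt
  rw [tttLoopA_eq]
  simp only [tttLenB_eq, PySem.List.pyRange_neg_one, List.map_map,
    pow_zero, Int.ediv_one, Nat.zero_add, List.nil_append]
  set L := pvDigLen num with hL
  have hlen : ((L:Int) - 1 - -1).toNat = L := by omega
  rw [hlen]
  apply List.ext_getElem
  · simp
  · intro j h1 h2
    simp only [List.getElem_reverse, List.getElem_map, List.getElem_range, List.length_map,
      List.length_range, Function.comp] at *
    have hj : j < L := by simpa using h2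
    have hp : ((L:Int) - 1 - (j:Int)).toNat = L - 1 - j := by omega
    rw [PySem.Int.floordiv_eq_ediv_of_pos (by positivity),
      PySem.Int.mod_eq_emod_of_pos (by norm_num : (0:Int) < 10), hp]
    have e3 : ((L - 1 - j : Nat) : Int) = (L:Int) - 1 - j := by omega
    rw [e3, zero_add]
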